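-- pv_equiv track=rewrite | github.com/rashneh/Grovers-Algorithm | driver.py | read_list_to_key
-- ===== SOURCE A (Python) =====
-- def read_list_to_key(rows):
--     key = {}
--     next_num = 1
--     for row in rows:
--         for item in row:
--             var = item.strip()
--             if var == "":
--                 continue  # Skip empty strings
--             # Remove a leading tilde if present.
--             if var[0] == '~':
--                 var = var[1:].strip()
--             if var not in key:
--                 key[var] = next_num
--                 next_num += 1
--     return key
-- ===== SOURCE B (Python) =====
-- def read_list_to_key(rows):
--     toks = []
--     for row in rows:
--         for item in row:
--             s = item.strip()
--             if s != "":
--                 toks.append(s[1:].strip() if s[0] == '~' else s)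
--     first = {}
--     for i, v in reversed(list(enumerate(toks))):
--         first[v] = i
--     order = sorted(set(toks), key=lambda v: first[v])
--     return {v: i + 1 for i, v in enumerate(order)}
-- ===== Notes on version B (the rewrite author's own statement) =====
-- stated objective: alternative
-- what changed: Replaces A's online dedup-with-counter dict build by a different algorithm: first collect ALL normalized tokens (with duplicates) into a flat list, compute each token's first-occurrence index in one reversed enumerate pass, then recover the first-seen order by SORTING the distinct tokens by that index and numbering the sorted list; correctness rests on first-occurrence indices being strictly increasing along the distinct tokens.
import Mathlib
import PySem

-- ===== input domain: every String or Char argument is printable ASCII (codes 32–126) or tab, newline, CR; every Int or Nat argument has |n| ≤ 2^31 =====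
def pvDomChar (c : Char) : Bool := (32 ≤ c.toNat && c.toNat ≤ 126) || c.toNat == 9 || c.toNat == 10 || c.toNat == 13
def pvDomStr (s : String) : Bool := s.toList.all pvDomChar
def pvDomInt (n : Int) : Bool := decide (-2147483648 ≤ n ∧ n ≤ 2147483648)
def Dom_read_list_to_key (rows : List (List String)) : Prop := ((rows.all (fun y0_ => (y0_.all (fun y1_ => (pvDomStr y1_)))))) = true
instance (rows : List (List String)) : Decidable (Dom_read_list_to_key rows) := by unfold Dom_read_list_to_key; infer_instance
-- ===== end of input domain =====

-- B collects all normalized tokens into a flat list and recovers the first-seen numbering by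
-- sorting the distinct tokens by their first-occurrence index (sorted(set(toks), key=toks.index));
-- objective: a genuinely different (sort-based) algorithm of similar size, not faster.


-- ===== PORT A =====
-- A's per-item variable normalization: var = item.strip(); if var[0] == '~': var = var[1:].strip()
def pvAVar (item : String) : String :=
  if PySem.Str.pyGet? (PySem.Str.strip item) 0 = some '~'
  then PySem.Str.strip (PySem.Str.slice (PySem.Str.strip item) (some 1) none)
  else PySem.Str.strip item

-- one iteration of A's inner loop, acting on the state (key, next_num)
def pvStepA (st : PySem.Dict String Int × Int) (item : String) : PySem.Dict String Int × Int :=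
  if PySem.Str.strip item = "" then st
  else if st.1.contains (pvAVar item) = false
       then (st.1.insert (pvAVar item) st.2, st.2 + 1)
       else st

def read_list_to_key (rows : List (List String)) : List (String × Int) :=
  (rows.foldl (fun st row => row.foldl pvStepA st) (PySem.Dict.mk [], 1)).1.items

-- ===== PORT B =====
-- Source B's normalized token: s[1:].strip() if s[0] == '~' else s  (for s = item.strip())
def pvBNorm (item : String) : String :=
  if PySem.Str.pyGet? (PySem.Str.strip item) 0 = some '~'
  then PySem.Str.strip (PySem.Str.slice (PySem.Str.strip item) (some 1) none)
  else PySem.Str.strip item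

-- the flat token list toks (duplicates kept)
def pvToks (rows : List (List String)) : List String :=
  rows.foldl (fun t row =>
    row.foldl (fun t item =>
      if PySem.Str.strip item != "" then t ++ [pvBNorm item] else t) t) []

-- first-occurrence index of every token: for i, v in reversed(list(enumerate(toks))): first[v] = i
def pvFirst (toks : List String) : PySem.Dict String Int :=
  (PySem.List.enumerate toks 0).reverse.foldl
    (fun d p => d.insert p.2 p.1) (PySem.Dict.mk [])

-- order = sorted(set(toks), key=lambda v: first[v]); the lookup first[v] always succeeds
-- (every element of set(toks) is a key of first), so the getD default 0 is never used
def read_list_to_key_alt (rows : List (List String)) : List (String × Int) :=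
  ((PySem.List.enumerate
      (PySem.List.sorted (PySem.Set.ofList (pvToks rows))
        (fun v => (pvFirst (pvToks rows)).getD v 0)) 0).foldl
    (fun d p => d.insert p.2 (p.1 + 1)) (PySem.Dict.mk [])).items

-- ===== PRECONDITION & SPEC =====
def Spec_read_list_to_key (rows : List (List String)) (out : List (String × Int)) : Prop := out = read_list_to_key_alt rows
instance (rows : List (List String)) (out : List (String × Int)) : Decidable (Spec_read_list_to_key rows out) := by unfold Spec_read_list_to_key; infer_instance

-- ===== CLAIM (what is proved, stated in full; the proofs are below) =====
def Claim_equal_read_list_to_key : Prop := ∀ (rows : List (List String)), Dom_read_list_to_key rows → Spec_read_list_to_key rows (read_list_to_key rows)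

-- ===== LEMMAS AND PROOFS =====

-- the dict numbering the elements of acc from 1 upward
def pvNum (acc : List String) : PySem.Dict String Int :=
  PySem.Dict.mk ((PySem.List.enumerate acc 1).map (fun p => (p.2, p.1)))

-- A's per-item effect expressed on the seen-keys list
def pvAccStep (acc : List String) (item : String) : List String :=
  if PySem.Str.strip item = "" then acc else PySem.Set.add acc (pvAVar item)

theorem pvNum_contains (acc : List String) (v : String) :
    (pvNum acc).contains v = acc.contains v := by
  have h2 : (PySem.List.enumerate acc 1).any (fun p => p.2 == v)
      = ((PySem.List.enumerate acc 1).map (fun p => p.2)).any (fun x => x == v) := by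
    rw [List.any_map]; rfl
  simp only [pvNum, PySem.Dict.contains, List.any_map]
  rw [show ((fun p : String × Int => p.1 == v) ∘ fun p : Int × String => (p.2, p.1))
      = (fun p : Int × String => p.2 == v) from rfl]
  rw [h2, PySem.List.map_snd_enumerate]
  exact List.any_beq'

theorem pvNum_insert_fresh (acc : List String) (v : String) (h : acc.contains v = false) :
    (pvNum acc).insert v ((acc.length : Int) + 1) = pvNum (acc ++ [v]) := by
  have hc : (pvNum acc).contains v = false := by rw [pvNum_contains]; exact h
  apply PySem.Dict.ext
  simp only [PySem.Dict.insert, hc, Bool.false_eq_true, if_false]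
  simp only [pvNum]
  rw [PySem.List.enumerate_append]
  simp [PySem.List.enumerate]
  omega

theorem pvStep_num (acc : List String) (item : String) :
    pvStepA (pvNum acc, (acc.length : Int) + 1) item
      = (pvNum (pvAccStep acc item), ((pvAccStep acc item).length : Int) + 1) := by
  unfold pvStepA pvAccStep
  by_cases he : PySem.Str.strip item = ""
  · simp [he]
  · simp only [he, if_false]
    by_cases hm : pvAVar item ∈ acc
    · have hc : acc.contains (pvAVar item) = true := by simpa using hm
      simp [pvNum_contains, PySem.Set.add, hm]
    · have hc : acc.contains (pvAVar item) = false := by simpa using hm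
      simp only [pvNum_contains, hc]
      rw [pvNum_insert_fresh acc _ hc]
      simp [PySem.Set.add, hm]

theorem pvFold_num (its : List String) (acc : List String) :
    its.foldl pvStepA (pvNum acc, (acc.length : Int) + 1)
      = (pvNum (its.foldl pvAccStep acc), ((its.foldl pvAccStep acc).length : Int) + 1) := by
  induction its generalizing acc with
  | nil => rfl
  | cons x t ih => simp only [List.foldl_cons, pvStep_num]; exact ih (pvAccStep acc x)

-- A's seen-keys fold is Set.ofList of the flat normalized token list
theorem pvFold_filter_map (p : String → Bool) (l : List String) (a : List String) :
    ((l.filter p).map pvAVar).foldl PySem.Set.add a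
      = l.foldl (fun a x => if p x then PySem.Set.add a (pvAVar x) else a) a := by
  induction l generalizing a with
  | nil => rfl
  | cons x t ih =>
    by_cases h : p x = true
    · simp [h, ih]
    · simp only [Bool.not_eq_true] at h
      simp [h, ih]

theorem pvAcc_eq_ofList (its : List String) :
    its.foldl pvAccStep []
      = PySem.Set.ofList ((its.filter (fun item => PySem.Str.strip item != "")).map pvAVar) := by
  rw [PySem.Set.ofList_eq_foldl, pvFold_filter_map]
  congr 1
  funext a x
  unfold pvAccStep
  by_cases h : PySem.Str.strip x = "" <;> simp [h]

-- B's flat token list equals the same flat normalized token list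
theorem pvToks_eq (rows : List (List String)) :
    pvToks rows
      = (rows.flatten.filter (fun item => PySem.Str.strip item != "")).map pvAVar := by
  unfold pvToks
  rw [← List.foldl_flatten]
  have := PySem.List.foldl_append_if (fun item => PySem.Str.strip item != "") pvBNorm
    rows.flatten []
  simpa [pvBNorm, pvAVar] using this

-- the reversed-enumerate dict maps each member to its FIRST-occurrence index (shifted by n)
theorem pvFirst_getD : ∀ (t : List String) (n : Int) (v : String), v ∈ t →
    ((PySem.List.enumerate t n).reverse.foldl
       (fun d p => d.insert p.2 p.1) (PySem.Dict.mk [])).getD v 0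
      = n + (t.idxOf v : Int) := by
  intro t
  induction t with
  | nil => intro n v hv; cases hv
  | cons y t ih =>
    intro n v hv
    rw [PySem.List.enumerate_cons, List.reverse_cons, List.foldl_append]
    simp only [List.foldl_cons, List.foldl_nil]
    by_cases hvy : v = y
    · subst hvy
      rw [PySem.Dict.getD_insert_self]
      simp [List.idxOf_cons_self]
    · rw [PySem.Dict.getD_insert_of_ne (hne := hvy)]
      have hvt : v ∈ t := by cases hv with
        | head => exact absurd rfl hvy
        | tail _ h => exact h
      rw [ih (n + 1) v hvt, List.idxOf_cons_ne _ (fun e => hvy e.symm)]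
      push_cast
      ring

-- Set.ofList peeled at the head: the rest is ofList of the tail with the head filtered out
theorem pvFoldlAdd : ∀ (n : Nat) (t : List String), t.length ≤ n → ∀ acc : List String,
    t.foldl PySem.Set.add acc
      = acc ++ PySem.Set.ofList (t.filter (fun y => !acc.contains y)) := by
  intro n
  induction n with
  | zero =>
    intro t ht acc
    have : t = [] := List.eq_nil_of_length_eq_zero (Nat.le_zero.mp ht)
    subst this; simp [PySem.Set.ofList]
  | succ n ih =>
    intro t ht acc
    cases t with
    | nil => simp [PySem.Set.ofList]
    | cons y t' =>
      have ht' : t'.length ≤ n := by simpa using ht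
      rw [List.foldl_cons, ih t' ht' (PySem.Set.add acc y)]
      by_cases hy : acc.contains y = true
      · have hym : y ∈ acc := by simpa using hy
        have hadd : PySem.Set.add acc y = acc := by simp [PySem.Set.add, hym]
        rw [hadd]
        simp [hym]
      · have hyf : acc.contains y = false := by simpa using hy
        have hym : y ∉ acc := by simpa using hyf
        have hadd : PySem.Set.add acc y = acc ++ [y] := by
          simp [PySem.Set.add, hym]
        rw [hadd]
        have hfil : (y :: t').filter (fun z => !acc.contains z)
            = y :: t'.filter (fun z => !acc.contains z) := by
          simp [hym]
        rw [hfil]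
        have hy0 : PySem.Set.ofList (y :: t'.filter (fun z => !acc.contains z))
            = (t'.filter (fun z => !acc.contains z)).foldl PySem.Set.add [y] := by
          rw [PySem.Set.ofList_eq_foldl]; rfl
        have hlen : (t'.filter (fun z => !acc.contains z)).length ≤ n :=
          le_trans (List.length_filter_le _ _) ht'
        rw [hy0, ih _ hlen [y]]
        rw [List.filter_filter]
        rw [List.append_assoc]
        congr 2
        refine congrArg PySem.Set.ofList (List.filter_congr ?_)
        intro z _
        simp [Bool.not_or, Bool.and_comm]

theorem pvOfListCons (y : String) (t : List String) :
    PySem.Set.ofList (y :: t) = y :: PySem.Set.ofList (t.filter (fun z => !(z == y))) := by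
  rw [PySem.Set.ofList_eq_foldl, List.foldl_cons]
  have hadd : PySem.Set.add [] y = [y] := rfl
  rw [hadd, pvFoldlAdd t.length t le_rfl [y], List.singleton_append]
  refine congrArg (y :: ·) (congrArg PySem.Set.ofList (List.filter_congr ?_))
  intro z _
  cases hzy : z == y <;> simp [List.contains, List.elem, hzy]

-- filtering preserves the relative order of first-occurrence indices
theorem pvFilterMono (t : List String) (p : String → Bool) (a b : String)
    (ha : a ∈ t.filter p) (hb : b ∈ t.filter p)
    (h : (t.filter p).idxOf a < (t.filter p).idxOf b) : t.idxOf a < t.idxOf b := by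
  induction t with
  | nil => simp at ha
  | cons z t ih =>
    by_cases hz : p z = true
    · rw [List.filter_cons_of_pos hz] at ha hb h
      by_cases hbz : b = z
      · subst hbz
        simp [List.idxOf_cons_self] at h
      · by_cases haz : a = z
        · subst haz
          rw [List.idxOf_cons_self]
          rw [List.idxOf_cons_ne _ (fun e => hbz e.symm)]
          omega
        · rw [List.idxOf_cons_ne _ (fun e => hbz e.symm),
              List.idxOf_cons_ne _ (fun e => haz e.symm)] at h ⊢
          have ha' : a ∈ t.filter p := by
            cases ha with
            | head => exact absurd rfl haz
            | tail _ h' => exact h'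
          have hb' : b ∈ t.filter p := by
            cases hb with
            | head => exact absurd rfl hbz
            | tail _ h' => exact h'
          have := ih ha' hb' (by omega)
          omega
    · have hzf : p z = false := by simpa using hz
      rw [List.filter_cons_of_neg (by simp [hzf])] at ha hb h
      have haz : a ≠ z := fun e => by
        have := (List.mem_filter.mp ha).2; rw [e] at this; rw [this] at hzf; cases hzf
      have hbz : b ≠ z := fun e => by
        have := (List.mem_filter.mp hb).2; rw [e] at this; rw [this] at hzf; cases hzf
      rw [List.idxOf_cons_ne _ (fun e => haz e.symm),
          List.idxOf_cons_ne _ (fun e => hbz e.symm)]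
      have := ih ha hb h
      omega

-- the distinct tokens, in Set.ofList order, have strictly increasing first-occurrence indices
theorem pvGen : ∀ (n : Nat) (l : List String), l.length ≤ n → ∀ L : List String,
    (∀ a b, a ∈ l → b ∈ l → l.idxOf a < l.idxOf b → L.idxOf a < L.idxOf b) →
    (PySem.Set.ofList l).Pairwise (fun a b => L.idxOf a < L.idxOf b) := by
  intro n
  induction n with
  | zero =>
    intro l hl L _
    have : l = [] := List.eq_nil_of_length_eq_zero (Nat.le_zero.mp hl)
    subst this; simp [PySem.Set.ofList]
  | succ n ih =>
    intro l hl L h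
    cases l with
    | nil => simp [PySem.Set.ofList]
    | cons y t =>
      rw [pvOfListCons]
      have ht : t.length ≤ n := by simpa using hl
      constructor
      · intro b hb
        have hb' : b ∈ t.filter (fun z => !(z == y)) := by simpa [PySem.Set.mem_ofList] using hb
        have hbt : b ∈ t := (List.mem_filter.mp hb').1
        have hby : b ≠ y := by
          have := (List.mem_filter.mp hb').2; simpa using this
        apply h y b (List.mem_cons_self) (List.mem_cons_of_mem _ hbt)
        rw [List.idxOf_cons_self, List.idxOf_cons_ne _ (fun e => hby e.symm)]
        omega
      · apply ih _ (le_trans (List.length_filter_le _ _) ht) L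
        intro a b ha hb hlt
        have hat : a ∈ t := (List.mem_filter.mp ha).1
        have hbt : b ∈ t := (List.mem_filter.mp hb).1
        have hay : a ≠ y := by have := (List.mem_filter.mp ha).2; simpa using this
        have hby : b ≠ y := by have := (List.mem_filter.mp hb).2; simpa using this
        have hmono := pvFilterMono t (fun z => !(z == y)) a b ha hb hlt
        apply h a b (List.mem_cons_of_mem _ hat) (List.mem_cons_of_mem _ hbt)
        rw [List.idxOf_cons_ne _ (fun e => hay e.symm),
            List.idxOf_cons_ne _ (fun e => hby e.symm)]
        omega

-- sorted(set(toks), key=first-occurrence index) is set(toks) itself (first-seen order)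
theorem pvSorted_eq (toks : List String) :
    PySem.List.sorted (PySem.Set.ofList toks) (fun v => (pvFirst toks).getD v 0)
      = PySem.Set.ofList toks := by
  apply PySem.List.sorted_eq_of_perm_of_pairwise_lt _ _ _ (List.Perm.refl _)
  have hp := pvGen toks.length toks le_rfl toks (fun a b _ _ h => h)
  apply hp.imp_of_mem
  intro a b ha hb h
  have ha' : a ∈ toks := by simpa [PySem.Set.mem_ofList] using ha
  have hb' : b ∈ toks := by simpa [PySem.Set.mem_ofList] using hb
  have h1 := pvFirst_getD toks 0 a ha'
  have h2 := pvFirst_getD toks 0 b hb'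
  unfold pvFirst
  rw [h1, h2]
  omega

-- enumerate-from-0-plus-one is enumerate-from-1
theorem pvEnumShift (s : List String) : ∀ n : Int,
    (PySem.List.enumerate s n).map (fun p => (p.2, p.1 + 1))
      = (PySem.List.enumerate s (n + 1)).map (fun p => (p.2, p.1)) := by
  induction s with
  | nil => intro n; rfl
  | cons x t ih =>
    intro n
    rw [PySem.List.enumerate_cons, PySem.List.enumerate_cons]
    simp only [List.map_cons]
    rw [ih (n + 1)]

theorem pvAlt_items (rows : List (List String)) :
    read_list_to_key_alt rows = (pvNum (PySem.Set.ofList (pvToks rows))).items := by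
  unfold read_list_to_key_alt
  rw [pvSorted_eq]
  have hfresh := PySem.Dict.items_foldl_insert_fresh
    (PySem.List.enumerate (PySem.Set.ofList (pvToks rows)) 0)
    (fun p : Int × String => p.2) (fun p : Int × String => p.1 + 1) (PySem.Dict.mk [])
    (fun a _ => rfl)
    (by rw [PySem.List.map_snd_enumerate]; exact PySem.Set.nodup_ofList _)
  simp only [hfresh]
  have := pvEnumShift (PySem.Set.ofList (pvToks rows)) 0
  simp only [zero_add] at this
  simp [pvNum, this]

-- ===== VERDICT (by name: the statement is the Claim_ definition above) =====
theorem read_list_to_key_spec : Claim_equal_read_list_to_key := by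
  intro rows _
  unfold Spec_read_list_to_key
  rw [pvAlt_items]
  unfold read_list_to_key
  rw [← List.foldl_flatten]
  have hinit : (PySem.Dict.mk ([] : List (String × Int)), (1 : Int))
      = (pvNum [], (([] : List String).length : Int) + 1) := by
    norm_num [pvNum, PySem.List.enumerate]
  rw [hinit, pvFold_num]
  rw [pvAcc_eq_ofList, ← pvToks_eq]
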